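-- pv_equiv track=rewrite | github.com/eliottcassidy2000/math | 04-computation/lattice_boundary.py | get_cycle_data
-- ===== SOURCE A (Python) =====
-- from itertools import combinations, permutations
--
-- def count_directed_ham_cycles(A, verts):
--     k = len(verts)
--     if k == 3:
--         a, b, c = verts
--         return (A[a][b]*A[b][c]*A[c][a]) + (A[a][c]*A[c][b]*A[b][a])
--     dp = {}
--     dp[(1, 0)] = 1
--     for mask in range(1, 1 << k):
--         if not (mask & 1):
--             continue
--         for v in range(k):
--             if not (mask & (1 << v)):
--                 continue
--             if (mask, v) not in dp or dp[(mask, v)] == 0: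
--                 continue
--             c = dp[(mask, v)]
--             for w in range(k):
--                 if mask & (1 << w):
--                     continue
--                 if A[verts[v]][verts[w]]:
--                     nk = (mask | (1 << w), w)
--                     dp[nk] = dp.get(nk, 0) + c
--     full = (1 << k) - 1
--     total = 0
--     for v in range(1, k):
--         if (full, v) in dp and dp[(full, v)] > 0:
--             if A[verts[v]][verts[0]]:
--                 total += dp[(full, v)]
--     return total
--
-- def get_cycle_data(A, n):
--     """Get directed odd cycles with vertex sets."""
--     cycles = []
--     for k in range(3, n+1, 2):
--         for subset in combinations(range(n), k):
--             verts = list(subset)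
--             nc = count_directed_ham_cycles(A, verts)
--             for _ in range(nc):
--                 cycles.append(frozenset(subset))
--     a1 = len(cycles)
--     a2 = 0
--     for i in range(len(cycles)):
--         for j in range(i+1, len(cycles)):
--             if not (cycles[i] & cycles[j]):
--                 a2 += 1
--     return a1, a2, cycles
-- ===== SOURCE B (Python) =====
-- def count_cycles(A, verts):
--     k = len(verts)
--     if k == 3:
--         a, b, c = verts
--         return (A[a][b]*A[b][c]*A[c][a]) + (A[a][c]*A[c][b]*A[b][a])
--     dp = [[0] * k for _ in range(1 << k)]
--     dp[1][0] = 1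
--     for mask in range(1, 1 << k, 2):
--         for v in range(k):
--             c = dp[mask][v]
--             if c and (mask >> v) & 1:
--                 for w in range(k):
--                     if not ((mask >> w) & 1) and A[verts[v]][verts[w]]:
--                         dp[mask | (1 << w)][w] += c
--     full = (1 << k) - 1
--     total = 0
--     for v in range(1, k):
--         if dp[full][v] and A[verts[v]][verts[0]]:
--             total += dp[full][v]
--     return total
--
--
-- def combos(pool, k):
--     if k == 0:
--         return [[]]
--     out = []
--     for i in range(len(pool)):
--         for tail in combos(pool[i + 1:], k - 1):
--             out.append([pool[i]] + tail)
--     return out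
--
--
-- def get_cycle_data(A, n):
--     """Get directed odd cycles with vertex sets (dense-table DP, grouped pair count)."""
--     groups = []
--     for k in range(3, n + 1, 2):
--         for subset in combos(list(range(n)), k):
--             c = count_cycles(A, subset)
--             if c > 0:
--                 groups.append((subset, c))
--     cycles = [frozenset(s) for s, c in groups for _ in range(c)]
--     a1 = sum(c for _, c in groups)
--     a2 = 0
--     rest = groups
--     while rest:
--         (s, c), rest = rest[0], rest[1:]
--         ss = set(s)
--         for t, d in rest:
--             if ss.isdisjoint(t):
--                 a2 += c * d
--     return a1, a2, cycles
-- ===== Notes on version B (the rewrite author's own statement) =====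
-- stated objective: alternative
-- what changed: B counts each subset's directed Hamiltonian cycles with a dense (1<<k) x k table iterated over odd masks only instead of A's dict-keyed DP, enumerates the k-subsets by its own first-element recursion instead of itertools.combinations, and computes the disjoint-pair count by summing c*d over disjoint (subset, multiplicity) groups instead of A's quadratic loop over the expanded cycle list (equal subsets are never disjoint, so grouping is exact).
import Mathlib
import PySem

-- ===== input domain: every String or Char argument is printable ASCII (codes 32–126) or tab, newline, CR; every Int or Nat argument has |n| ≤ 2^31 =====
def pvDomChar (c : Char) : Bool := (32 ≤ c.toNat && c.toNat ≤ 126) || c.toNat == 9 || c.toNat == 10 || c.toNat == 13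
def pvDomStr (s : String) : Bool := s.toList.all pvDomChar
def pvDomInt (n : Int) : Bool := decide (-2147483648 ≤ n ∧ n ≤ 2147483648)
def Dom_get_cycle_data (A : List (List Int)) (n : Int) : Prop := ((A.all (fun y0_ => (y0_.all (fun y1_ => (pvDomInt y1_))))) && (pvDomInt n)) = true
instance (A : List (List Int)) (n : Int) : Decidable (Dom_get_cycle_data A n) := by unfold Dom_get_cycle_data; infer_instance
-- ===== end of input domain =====

-- B replaces A's dict-based per-subset bitmask DP by a dense 2^k × k table iterated over the
-- odd masks only, enumerates the k-subsets by its own first-element recursion, and counts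
-- disjoint pairs over (subset, multiplicity) groups instead of A's quadratic loop over the
-- expanded cycle list (equal subsets are never disjoint, so grouping is exact).

-- ===== PORT A =====
-- A's module context: `A[i][j]`, `not (x & y)`, itertools.combinations, count_directed_ham_cycles
def mat (A : List (List Int)) (i j : Int) : Int :=
  PySem.List.pyGetD (PySem.List.pyGetD A i []) j 0   -- A[i][j]; exact under Pre_ (indices in range)

def disj (s t : List Int) : Bool :=
  !(s.any (fun x => t.contains x))   -- `not (s & t)`: the frozensets share no element

-- itertools.combinations(l, k) in Python's lexicographic order
def combs : List Int → Nat → List (List Int)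
  | _, 0 => [[]]
  | [], _ + 1 => []
  | x :: xs, k + 1 => (combs xs k).map (fun t => x :: t) ++ combs xs (k + 1)

-- count_directed_ham_cycles (A's module helper: dict-based bitmask DP)
def countDHC (A : List (List Int)) (verts : List Int) : Int :=
  match verts with
  | [a, b, c] =>
      mat A a b * mat A b c * mat A c a + mat A a c * mat A c b * mat A b a
  | _ =>
    let k := verts.length
    let dp : PySem.Dict (Nat × Nat) Int := PySem.Dict.empty.insert (1, 0) 1
    let dp := (List.range' 1 (2 ^ k - 1)).foldl (fun dp mask =>
      if mask &&& 1 == 0 then dp else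
      (List.range k).foldl (fun dp v =>
        if mask &&& (1 <<< v) == 0 then dp else
        match dp.get? (mask, v) with
        | none => dp
        | some c =>
          if c == 0 then dp else
          (List.range k).foldl (fun dp w =>
            if mask &&& (1 <<< w) != 0 then dp else
            if mat A (verts.getD v 0) (verts.getD w 0) != 0 then
              dp.insert (mask ||| (1 <<< w), w) (dp.getD (mask ||| (1 <<< w), w) 0 + c)
            else dp) dp) dp) dp
    let full := 2 ^ k - 1
    (List.range' 1 (k - 1)).foldl (fun total v =>
      match dp.get? (full, v) with
      | some d =>
          if d > 0 then
            if mat A (verts.getD v 0) (verts.getD 0 0) != 0 then total + d else total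
          else total
      | none => total) 0

def get_cycle_data (A : List (List Int)) (n : Int) : Int × Int × List (List Int) :=
  let cycles := (PySem.List.pyRange 3 (n + 1) 2).foldl (fun cyc k =>
      (combs (PySem.List.pyRange 0 n 1) k.toNat).foldl (fun cyc s =>
        cyc ++ List.replicate (countDHC A s).toNat s) cyc) []
  let a1 := PySem.List.len cycles
  let a2 := (PySem.List.pyRange 0 (PySem.List.len cycles) 1).foldl (fun a2 i =>
      (PySem.List.pyRange (i + 1) (PySem.List.len cycles) 1).foldl (fun a2 j =>
        if disj (PySem.List.pyGetD cycles i []) (PySem.List.pyGetD cycles j []) then a2 + 1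
        else a2) a2) 0
  (a1, a2, cycles)

-- ===== PORT B =====
-- nested-list table access: dp[m][w] and dp[m][w] = x (indices always in range in B's use)
def tget (dp : List (List Int)) (m w : Nat) : Int := (dp.getD m []).getD w 0
def tset (dp : List (List Int)) (m w : Nat) (x : Int) : List (List Int) :=
  dp.set m ((dp.getD m []).set w x)

-- B's count_cycles: the same recurrence on a dense (1 << k) × k table, odd masks only
def countB (A : List (List Int)) (verts : List Int) : Int :=
  match verts with
  | [a, b, c] =>
      mat A a b * mat A b c * mat A c a + mat A a c * mat A c b * mat A b a
  | _ =>
    let k := verts.length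
    let dp0 : List (List Int) := tset (List.replicate (2 ^ k) (List.replicate k 0)) 1 0 1
    let dp := (List.range' 1 (2 ^ k / 2) 2).foldl (fun dp mask =>
      (List.range k).foldl (fun dp v =>
        let c := tget dp mask v
        if c != 0 && (mask >>> v) &&& 1 == 1 then
          (List.range k).foldl (fun dp w =>
            if (mask >>> w) &&& 1 == 0 && mat A (verts.getD v 0) (verts.getD w 0) != 0 then
              tset dp (mask ||| (1 <<< w)) w (tget dp (mask ||| (1 <<< w)) w + c)
            else dp) dp
        else dp) dp) dp0
    let full := 2 ^ k - 1
    (List.range' 1 (k - 1)).foldl (fun total v =>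
      if tget dp full v != 0 && mat A (verts.getD v 0) (verts.getD 0 0) != 0 then
        total + tget dp full v
      else total) 0

-- B's combos: choose the first element, recurse on the rest of the pool
def combsB : List Int → Nat → List (List Int)
  | _, 0 => [[]]
  | l, k + 1 =>
      (List.range l.length).flatMap (fun i =>
        (combsB (l.drop (i + 1)) k).map (fun tail => l.getD i 0 :: tail))
  termination_by _ k => k

-- set(s).isdisjoint(t)
def disjB (s t : List Int) : Bool := s.all (fun x => !t.contains x)

-- `while rest: (s, c), rest = rest[0], rest[1:]; for t, d in rest: …`
def pairLoop (a2 : Int) : List (List Int × Int) → Int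
  | [] => a2
  | (s, c) :: rest =>
      pairLoop (rest.foldl (fun a p => if disjB s p.1 then a + c * p.2 else a) a2) rest

def get_cycle_data_alt (A : List (List Int)) (n : Int) : Int × Int × List (List Int) :=
  let groups := (PySem.List.pyRange 3 (n + 1) 2).foldl (fun g k =>
      (combsB (PySem.List.pyRange 0 n 1) k.toNat).foldl (fun g s =>
        let c := countB A s
        if 0 < c then g ++ [(s, c)] else g) g) []
  let cycles := groups.flatMap (fun p => List.replicate p.2.toNat p.1)
  let a1 := (groups.map (·.2)).sum
  let a2 := pairLoop 0 groups
  (a1, a2, cycles)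

-- ===== PRECONDITION & SPEC =====
-- Pre_ excludes exactly the inputs where Python A raises IndexError: when n ≥ 3 it reads
-- A[i][j] for every ordered pair i ≠ j below n, so all those entries must exist.
def Pre_get_cycle_data (A : List (List Int)) (n : Int) : Prop :=
  3 ≤ n → n.toNat ≤ A.length ∧
    ∀ i < n.toNat, (if i = n.toNat - 1 then n.toNat - 1 else n.toNat) ≤ (A.getD i []).length
instance (A : List (List Int)) (n : Int) : Decidable (Pre_get_cycle_data A n) := by
  unfold Pre_get_cycle_data; infer_instance

def pvWitness_get_cycle_data : List (List Int) × Int := ([[0, 1, 0], [0, 0, 1], [1, 0, 0]], 3)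

def Spec_get_cycle_data (A : List (List Int)) (n : Int) (out : Int × Int × List (List Int)) : Prop := out = get_cycle_data_alt A n
instance (A : List (List Int)) (n : Int) (out : Int × Int × List (List Int)) : Decidable (Spec_get_cycle_data A n out) := by unfold Spec_get_cycle_data; infer_instance

-- ===== CLAIM (what is proved, stated in full; the proofs are below) =====
def Claim_equal_get_cycle_data : Prop := ∀ (A : List (List Int)) (n : Int), Dom_get_cycle_data A n → Pre_get_cycle_data A n → Spec_get_cycle_data A n (get_cycle_data A n)

-- ===== LEMMAS AND PROOFS =====

-- B's combos enumerates the same lists in the same order as itertools.combinations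
lemma combsB_eq : ∀ (l : List Int) (k : Nat), combsB l k = combs l k := by
  intro l
  induction l with
  | nil =>
    intro k
    cases k with
    | zero => simp [combsB, combs]
    | succ k => simp [combsB, combs]
  | cons x xs ih =>
    intro k
    cases k with
    | zero => simp [combsB, combs]
    | succ k =>
      rw [combsB, combs, List.length_cons, List.range_succ_eq_map, List.flatMap_cons]
      rw [List.flatMap_map]
      have h2 : ∀ i : Nat,
          (combsB ((x :: xs).drop (i + 1 + 1)) k).map (fun t => (x :: xs).getD (i + 1) 0 :: t)
            = (combsB (xs.drop (i + 1)) k).map (fun t => xs.getD i 0 :: t) := by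
        intro i; rfl
      simp only [h2]
      have h3 : (List.range xs.length).flatMap
          (fun i => (combsB (xs.drop (i + 1)) k).map (fun t => xs.getD i 0 :: t))
            = combsB xs (k + 1) := by
        rw [combsB]
      rw [h3]
      simp only [Nat.zero_add, List.drop_succ_cons, List.drop_zero, List.getD_cons_zero]
      rw [ih, ih]

-- set(s).isdisjoint(t) = not (s & t)
lemma disjB_eq : ∀ (s t : List Int), disjB s t = disj s t := by
  intro s t
  induction s with
  | nil => rfl
  | cons x xs ih => simp [disjB, disj] at ih ⊢; tauto

-- B's dense-table DP computes the same count as A's dict DP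
-- bit tests: `(m >> w) & 1` vs `m & (1 << w)`
lemma bit_clear_iff (m w : Nat) : ((m >>> w) &&& 1 = 0) ↔ (m &&& (1 <<< w) = 0) := by
  rw [Nat.and_one_is_mod, Nat.shiftRight_eq_div_pow, Nat.shiftLeft_eq, one_mul, Nat.and_two_pow]
  have h : Nat.testBit m w = decide (m / 2 ^ w % 2 = 1) := Nat.testBit_eq_decide_div_mod_eq
  have hp : 0 < 2 ^ w := Nat.two_pow_pos w
  by_cases hb : m.testBit w
  · have h1 : m / 2 ^ w % 2 = 1 := by rw [hb] at h; simpa using h.symm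
    simp [hb, h1]
  · have h1 : ¬ (m / 2 ^ w % 2 = 1) := by
      intro hc; rw [h] at hb; simp [hc] at hb
    simp [hb]
    omega

lemma bit_set_iff (m w : Nat) : ((m >>> w) &&& 1 = 1) ↔ ¬ (m &&& (1 <<< w) = 0) := by
  rw [← bit_clear_iff]
  rw [Nat.and_one_is_mod]
  omega

-- two folds over the same list preserve a relation between their states
lemma pairFold {α β γ : Type} (R : α → β → Prop) (f : α → γ → α) (g : β → γ → β) :
    ∀ (l : List γ) (a : α) (b : β), R a b →
      (∀ a b x, x ∈ l → R a b → R (f a x) (g b x)) →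
      R (l.foldl f a) (l.foldl g b) := by
  intro l
  induction l with
  | nil => intro a b h _; exact h
  | cons x xs ih =>
    intro a b h hstep
    exact ih _ _ (hstep a b x (by simp) h) (fun a b y hy => hstep a b y (by simp [hy]))

-- a fold that skips even values over range(s, s+2m+1) is a fold over range(s, s+2m+2, 2)
lemma foldl_skip_even {α : Type} (f : α → Nat → α) :
    ∀ (m s : Nat) (a : α), s % 2 = 1 →
      (List.range' s (2 * m + 1) 1).foldl (fun acc x => if x &&& 1 == 0 then acc else f acc x) a
        = (List.range' s (m + 1) 2).foldl f a := by
  intro m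
  induction m with
  | zero =>
    intro s a hs
    simp [List.range'_one, Nat.and_one_is_mod, hs]
  | succ m ih =>
    intro s a hs
    have l1 : List.range' s (2 * (m + 1) + 1) 1 = s :: (s + 1) :: List.range' (s + 2) (2 * m + 1) 1 := by
      rw [show 2 * (m + 1) + 1 = (2 * m + 1) + 1 + 1 by ring, List.range'_succ, List.range'_succ,
        show s + 1 + 1 = s + 2 by omega]
    have l2 : List.range' s (m + 1 + 1) 2 = s :: List.range' (s + 2) (m + 1) 2 := by
      rw [List.range'_succ]
    rw [l1, l2]
    simp only [List.foldl_cons]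
    have hsa : s &&& 1 = 1 := by rw [Nat.and_one_is_mod]; omega
    have hsb : (s + 1) &&& 1 = 0 := by rw [Nat.and_one_is_mod]; omega
    rw [hsa, hsb]
    simp only [beq_self_eq_true, if_true]
    have h10 : ((1 : Nat) == 0) = false := by decide
    rw [h10]
    simp only [Bool.false_eq_true, if_false]
    exact ih (s + 2) (f a s) (by omega)

-- the joint invariant between A's dict and B's table
def InvDT (k : Nat) (d : PySem.Dict (Nat × Nat) Int) (t : List (List Int)) : Prop :=
  t.length = 2 ^ k ∧ (∀ r ∈ t, r.length = k) ∧
  (∀ m w : Nat, tget t m w = d.getD (m, w) 0) ∧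
  (∀ (p : Nat × Nat) (c : Int), d.get? p = some c → 0 < c)

lemma InvDT.row {k : Nat} {d : PySem.Dict (Nat × Nat) Int} {t : List (List Int)}
    (h : InvDT k d t) {m : Nat} (hm : m < 2 ^ k) : (t.getD m []).length = k := by
  have hlen : m < t.length := by rw [h.1]; exact hm
  rw [List.getD_eq_getElem?_getD, List.getElem?_eq_getElem hlen]
  exact h.2.1 _ (List.getElem_mem hlen)

lemma InvDT.getD_nonneg {k : Nat} {d : PySem.Dict (Nat × Nat) Int} {t : List (List Int)}
    (h : InvDT k d t) (p : Nat × Nat) : 0 ≤ d.getD p 0 := by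
  rw [PySem.Dict.getD_eq_get?_getD]
  cases hc : d.get? p with
  | none => simp
  | some c => simpa using le_of_lt (h.2.2.2 p c hc)

lemma tget_tset (t : List (List Int)) (M W : Nat) (x : Int)
    (hM : M < t.length) (hW : W < (t.getD M []).length) (m w : Nat) :
    tget (tset t M W x) m w = if m = M ∧ w = W then x else tget t m w := by
  unfold tget tset
  simp only [List.getD_eq_getElem?_getD] at hW ⊢
  rw [List.getElem?_set]
  by_cases hm : M = m
  · subst hm
    rw [if_pos rfl, if_pos hM]
    simp only [Option.getD_some]
    rw [List.getElem?_set]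
    by_cases hw : W = w
    · subst hw
      rw [if_pos rfl, if_pos hW]
      simp
    · rw [if_neg hw]
      rw [if_neg (by tauto)]
  · rw [if_neg hm]
    rw [if_neg (by tauto)]

-- the innermost (w) loop step preserves the invariant
lemma stepW_inv (A : List (List Int)) (verts : List Int) (k : Nat) (mask v : Nat)
    (hmask : mask < 2 ^ k) (c : Int) (hc : 0 < c)
    (d : PySem.Dict (Nat × Nat) Int) (t : List (List Int)) (w : Nat) (hw : w < k)
    (h : InvDT k d t) :
    InvDT k
      (if mask &&& (1 <<< w) != 0 then d
       else if mat A (verts.getD v 0) (verts.getD w 0) != 0 then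
         d.insert (mask ||| (1 <<< w), w) (d.getD (mask ||| (1 <<< w), w) 0 + c)
       else d)
      (if (mask >>> w) &&& 1 == 0 && mat A (verts.getD v 0) (verts.getD w 0) != 0 then
         tset t (mask ||| (1 <<< w)) w (tget t (mask ||| (1 <<< w)) w + c)
       else t) := by
  by_cases hbit : mask &&& (1 <<< w) = 0
  · have hb0 : (mask >>> w) &&& 1 = 0 := (bit_clear_iff mask w).2 hbit
    have hb : ((mask >>> w) &&& 1 == 0) = true := by simp [hb0]
    rw [hb]
    have hb2 : (mask &&& (1 <<< w) != 0) = false := by simp [hbit]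
    rw [hb2]
    simp only [Bool.true_and, Bool.false_eq_true, if_false]
    by_cases hedge : mat A (verts.getD v 0) (verts.getD w 0) ≠ 0
    · have he : (mat A (verts.getD v 0) (verts.getD w 0) != 0) = true := by simpa using hedge
      rw [he]
      simp only [if_true]
      -- both update at key (mask ||| (1 <<< w), w)
      have hM : mask ||| (1 <<< w) < 2 ^ k := by
        have h1 : (1 <<< w) < 2 ^ k := by
          rw [Nat.shiftLeft_eq, one_mul]
          exact Nat.pow_lt_pow_right (by norm_num) hw
        exact Nat.or_lt_two_pow hmask h1
      have hMt : mask ||| (1 <<< w) < t.length := by rw [h.1]; exact hM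
      have hWt : w < (t.getD (mask ||| (1 <<< w)) []).length := by rw [h.row hM]; exact hw
      refine ⟨by simpa [tset] using h.1, ?_, ?_, ?_⟩
      · intro r hr
        rcases List.mem_or_eq_of_mem_set hr with hr | hr
        · exact h.2.1 r hr
        · rw [hr, List.length_set]; exact h.row hM
      · intro m' w'
        rw [tget_tset t _ _ _ hMt hWt m' w']
        rw [PySem.Dict.getD_insert]
        by_cases hkey : (m', w') = ((mask ||| (1 <<< w), w) : Nat × Nat)
        · have hmw : m' = mask ||| (1 <<< w) ∧ w' = w :=
            ⟨congrArg Prod.fst hkey, congrArg Prod.snd hkey⟩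
          rw [if_pos hmw, if_pos hkey, h.2.2.1]
        · have hmw : ¬ (m' = mask ||| (1 <<< w) ∧ w' = w) := by
            intro ⟨e1, e2⟩; exact hkey (by rw [e1, e2])
          rw [if_neg hmw, if_neg hkey]
          exact h.2.2.1 m' w'
      · intro p cc hp
        rw [PySem.Dict.get?_insert] at hp
        by_cases hkey : p = ((mask ||| (1 <<< w), w) : Nat × Nat)
        · rw [if_pos hkey] at hp
          have := h.getD_nonneg (mask ||| (1 <<< w), w)
          have hcc : cc = d.getD (mask ||| (1 <<< w), w) 0 + c := by
            simpa using hp.symm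
          omega
        · rw [if_neg hkey] at hp
          exact h.2.2.2 p cc hp
    · have he : (mat A (verts.getD v 0) (verts.getD w 0) != 0) = false := by
        simpa using hedge
      rw [he]
      simpa using h
  · have hb : ((mask >>> w) &&& 1 == 0) = false := by
      simp only [beq_eq_false_iff_ne, ne_eq]
      rw [Nat.and_one_is_mod]
      have := (bit_set_iff mask w).2 hbit
      rw [Nat.and_one_is_mod] at this
      omega
    rw [hb]
    have hb2 : (mask &&& (1 <<< w) != 0) = true := by simpa using hbit
    rw [hb2]
    simpa using h

-- the middle (v) loop step preserves the invariant
lemma stepV_inv (A : List (List Int)) (verts : List Int) (k : Nat) (mask : Nat)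
    (hmask : mask < 2 ^ k)
    (d : PySem.Dict (Nat × Nat) Int) (t : List (List Int)) (v : Nat)
    (h : InvDT k d t) :
    InvDT k
      (if mask &&& (1 <<< v) == 0 then d
       else match d.get? (mask, v) with
        | none => d
        | some c =>
          if c == 0 then d
          else (List.range k).foldl (fun dp w =>
            if mask &&& (1 <<< w) != 0 then dp
            else if mat A (verts.getD v 0) (verts.getD w 0) != 0 then
              dp.insert (mask ||| (1 <<< w), w) (dp.getD (mask ||| (1 <<< w), w) 0 + c)
            else dp) d)
      (if tget t mask v != 0 && (mask >>> v) &&& 1 == 1 then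
        (List.range k).foldl (fun dp w =>
          if (mask >>> w) &&& 1 == 0 && mat A (verts.getD v 0) (verts.getD w 0) != 0 then
            tset dp (mask ||| (1 <<< w)) w (tget dp (mask ||| (1 <<< w)) w + tget t mask v)
          else dp) t
       else t) := by
  by_cases hbit : mask &&& (1 <<< v) = 0
  · have hb1 : (mask &&& (1 <<< v) == 0) = true := by simpa using hbit
    have hb2 : ((mask >>> v) &&& 1 == 1) = false := by
      simp only [beq_eq_false_iff_ne, ne_eq]
      intro hx
      exact (bit_set_iff mask v).1 hx hbit
    rw [hb1, hb2]
    simpa using h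
  · have hb1 : (mask &&& (1 <<< v) == 0) = false := by simpa using hbit
    have hb2 : ((mask >>> v) &&& 1 == 1) = true := by
      have h1 := (bit_clear_iff mask v)
      have : (mask >>> v) &&& 1 ≠ 0 := fun hx => hbit (h1.1 hx)
      rw [Nat.and_one_is_mod] at this ⊢
      simp only [beq_iff_eq]
      omega
    rw [hb1, hb2]
    simp only [Bool.false_eq_true, if_false]
    cases hdv : d.get? (mask, v) with
    | none =>
      have htv : tget t mask v = 0 := by
        rw [h.2.2.1 mask v, PySem.Dict.getD_of_get?_eq_none _ _ hdv]
      rw [htv]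
      simp only [bne_self_eq_false, Bool.false_and, Bool.false_eq_true, if_false]
      exact h
    | some c =>
      have hc : 0 < c := h.2.2.2 _ _ hdv
      have htv : tget t mask v = c := by
        rw [h.2.2.1 mask v, PySem.Dict.getD_of_get?_eq_some _ _ hdv]
      rw [htv]
      have hcz : (c == 0) = false := by simp only [beq_eq_false_iff_ne, ne_eq]; omega
      have hcz2 : (c != 0) = true := by simp only [bne_iff_ne, ne_eq]; omega
      simp only [hcz, hcz2, Bool.and_true, Bool.false_eq_true, if_false, if_true]
      exact pairFold (InvDT k) _ _ (List.range k) d t h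
        (fun d' t' w hwmem h' =>
          stepW_inv A verts k mask v hmask c hc d' t' w (List.mem_range.1 hwmem) h')

-- A's dict DP after the mask loop, as a definition (proof helper)
def dpA (A : List (List Int)) (verts : List Int) : PySem.Dict (Nat × Nat) Int :=
  (List.range' 1 (2 ^ verts.length - 1)).foldl (fun dp mask =>
      if mask &&& 1 == 0 then dp else
      (List.range verts.length).foldl (fun dp v =>
        if mask &&& (1 <<< v) == 0 then dp else
        match dp.get? (mask, v) with
        | none => dp
        | some c =>
          if c == 0 then dp else
          (List.range verts.length).foldl (fun dp w =>
            if mask &&& (1 <<< w) != 0 then dp else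
            if mat A (verts.getD v 0) (verts.getD w 0) != 0 then
              dp.insert (mask ||| (1 <<< w), w) (dp.getD (mask ||| (1 <<< w), w) 0 + c)
            else dp) dp) dp) (PySem.Dict.empty.insert (1, 0) 1)

-- B's table DP after the mask loop (proof helper)
def dpB (A : List (List Int)) (verts : List Int) : List (List Int) :=
  (List.range' 1 (2 ^ verts.length / 2) 2).foldl (fun dp mask =>
      (List.range verts.length).foldl (fun dp v =>
        let c := tget dp mask v
        if c != 0 && (mask >>> v) &&& 1 == 1 then
          (List.range verts.length).foldl (fun dp w =>
            if (mask >>> w) &&& 1 == 0 && mat A (verts.getD v 0) (verts.getD w 0) != 0 then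
              tset dp (mask ||| (1 <<< w)) w (tget dp (mask ||| (1 <<< w)) w + c)
            else dp) dp
        else dp) dp)
    (tset (List.replicate (2 ^ verts.length) (List.replicate verts.length 0)) 1 0 1)

lemma init_inv (k : Nat) (hk : 1 ≤ k) :
    InvDT k (PySem.Dict.empty.insert ((1, 0) : Nat × Nat) (1 : Int))
      (tset (List.replicate (2 ^ k) (List.replicate k 0)) 1 0 1) := by
  have h2 : (2 : Nat) ≤ 2 ^ k := by
    calc (2 : Nat) = 2 ^ 1 := by norm_num
    _ ≤ 2 ^ k := Nat.pow_le_pow_right (by norm_num) hk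
  have hlen : (1 : Nat) < (List.replicate (2 ^ k) (List.replicate k (0 : Int))).length := by
    simp; omega
  have hrow : (List.replicate (2 ^ k) (List.replicate k (0 : Int))).getD 1 [] = List.replicate k 0 := by
    rw [List.getD_eq_getElem?_getD, List.getElem?_eq_getElem hlen]
    simp
  refine ⟨by simp [tset], ?_, ?_, ?_⟩
  · intro r hr
    rcases List.mem_or_eq_of_mem_set hr with hr | hr
    · exact (List.eq_of_mem_replicate hr) ▸ (by simp)
    · rw [hr, hrow]; simp
  · intro m w
    rw [tget_tset _ _ _ _ hlen (by rw [hrow]; simpa using hk) m w]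
    rw [PySem.Dict.getD_insert]
    by_cases hkey : (m, w) = ((1, 0) : Nat × Nat)
    · have : m = 1 ∧ w = 0 := by
        constructor <;> [exact congrArg Prod.fst hkey; exact congrArg Prod.snd hkey]
      rw [if_pos this, if_pos hkey]
    · have : ¬ (m = 1 ∧ w = 0) := by
        intro ⟨e1, e2⟩; exact hkey (by rw [e1, e2])
      rw [if_neg this, if_neg hkey]
      unfold tget
      by_cases hm : m < 2 ^ k
      · have hmem : (List.replicate (2 ^ k) (List.replicate k (0 : Int))).getD m [] = List.replicate k 0 := by
          rw [List.getD_eq_getElem?_getD, List.getElem?_eq_getElem (by simpa using hm)]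
          simp
        rw [hmem]
        simp [PySem.Dict.getD_empty]
      · have hnone : (List.replicate (2 ^ k) (List.replicate k (0 : Int)))[m]? = none :=
          List.getElem?_eq_none (by simpa using hm)
        simp only [List.getD_eq_getElem?_getD, hnone]
        simp [PySem.Dict.getD_empty]
  · intro p c hp
    rw [PySem.Dict.get?_insert] at hp
    by_cases hkey : p = ((1, 0) : Nat × Nat)
    · rw [if_pos hkey] at hp
      have : c = 1 := by simpa using hp.symm
      omega
    · rw [if_neg hkey] at hp
      simp [PySem.Dict.get?_empty] at hp

lemma dp_inv (A : List (List Int)) (verts : List Int) (hk : 1 ≤ verts.length) :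
    InvDT verts.length (dpA A verts) (dpB A verts) := by
  unfold dpA dpB
  have e2 : 2 ^ verts.length = 2 * 2 ^ (verts.length - 1) := by
    conv_lhs => rw [show verts.length = (verts.length - 1) + 1 by omega]
    rw [pow_succ]
    ring
  have em : 2 ^ verts.length - 1 = 2 * (2 ^ (verts.length - 1) - 1) + 1 := by
    have : 1 ≤ 2 ^ (verts.length - 1) := Nat.one_le_two_pow
    omega
  have ed : 2 ^ verts.length / 2 = (2 ^ (verts.length - 1) - 1) + 1 := by
    have : 1 ≤ 2 ^ (verts.length - 1) := Nat.one_le_two_pow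
    omega
  rw [em, ed, foldl_skip_even _ (2 ^ (verts.length - 1) - 1) 1 _ (by norm_num)]
  apply pairFold (InvDT verts.length) _ _ _ _ _ (init_inv verts.length hk)
  intro d t mask hmem h
  have hmask : mask < 2 ^ verts.length := by
    rcases List.mem_range'.1 hmem with ⟨i, hi, rfl⟩
    have : 1 ≤ 2 ^ (verts.length - 1) := Nat.one_le_two_pow
    omega
  exact pairFold (InvDT verts.length) _ _ (List.range verts.length) d t h
    (fun d' t' v _ h' => stepV_inv A verts verts.length mask hmask d' t' v h')

lemma total_eq (A : List (List Int)) (verts : List Int) (hk : 1 ≤ verts.length) :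
    (List.range' 1 (verts.length - 1)).foldl (fun total v =>
        if tget (dpB A verts) (2 ^ verts.length - 1) v != 0 &&
            mat A (verts.getD v 0) (verts.getD 0 0) != 0 then
          total + tget (dpB A verts) (2 ^ verts.length - 1) v
        else total) 0
      = (List.range' 1 (verts.length - 1)).foldl (fun total v =>
          match (dpA A verts).get? (2 ^ verts.length - 1, v) with
          | some d =>
              if d > 0 then
                if mat A (verts.getD v 0) (verts.getD 0 0) != 0 then total + d else total
              else total
          | none => total) 0 := by
  have h := dp_inv A verts hk
  apply pairFold (fun (a b : Int) => a = b) _ _ (List.range' 1 (verts.length - 1)) 0 0 rfl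
  intro a b v _ hab
  subst hab
  cases hd : (dpA A verts).get? (2 ^ verts.length - 1, v) with
  | none =>
    have ht : tget (dpB A verts) (2 ^ verts.length - 1) v = 0 := by
      rw [h.2.2.1, PySem.Dict.getD_of_get?_eq_none _ _ hd]
    rw [ht]
    simp
  | some dd =>
    have hdd : 0 < dd := h.2.2.2 _ _ hd
    have ht : tget (dpB A verts) (2 ^ verts.length - 1) v = dd := by
      rw [h.2.2.1, PySem.Dict.getD_of_get?_eq_some _ _ hd]
    rw [ht]
    have h1 : (dd != 0) = true := by simp only [bne_iff_ne, ne_eq]; omega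
    have h2 : dd > 0 := hdd
    rw [h1]
    simp only [Bool.true_and, if_pos h2]

lemma countB_eq (A : List (List Int)) : ∀ (verts : List Int), countB A verts = countDHC A verts := by
  intro verts
  have main : ∀ (vs : List Int), 1 ≤ vs.length →
      (List.range' 1 (vs.length - 1)).foldl (fun total v =>
          if tget (dpB A vs) (2 ^ vs.length - 1) v != 0 &&
              mat A (vs.getD v 0) (vs.getD 0 0) != 0 then
            total + tget (dpB A vs) (2 ^ vs.length - 1) v
          else total) 0
        = (List.range' 1 (vs.length - 1)).foldl (fun total v =>
            match (dpA A vs).get? (2 ^ vs.length - 1, v) with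
            | some d =>
                if d > 0 then
                  if mat A (vs.getD v 0) (vs.getD 0 0) != 0 then total + d else total
                else total
            | none => total) 0 := fun vs h => total_eq A vs h
  match verts with
  | [] => rfl
  | [a] => exact main [a] (by simp)
  | [a, b] => exact main [a, b] (by simp)
  | [a, b, c] => rfl
  | a :: b :: c :: d :: rest => exact main (a :: b :: c :: d :: rest) (by simp)

-- ===== main-body closed forms =====
-- the subsets both programs enumerate, in enumeration order
def subsetsL (n : Int) : List (List Int) :=
  (PySem.List.pyRange 3 (n + 1) 2).flatMap (fun k => combs (PySem.List.pyRange 0 n 1) k.toNat)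

-- B's groups, in closed form
def grp (A : List (List Int)) (n : Int) : List (List Int × Int) :=
  ((subsetsL n).filter (fun s => decide (0 < countDHC A s))).map (fun s => (s, countDHC A s))

-- structural form of A's pair count
def pairCnt : List (List Int) → Int
  | [] => 0
  | x :: xs => (xs.map (fun y => if disj x y then (1 : Int) else 0)).sum + pairCnt xs

-- structural form of B's pair count
def pairB : List (List Int × Int) → Int
  | [] => 0
  | (s, c) :: rest => (rest.map (fun p => if disj s p.1 then c * p.2 else 0)).sum + pairB rest

lemma length_of_mem_combs : ∀ (l : List Int) (k : Nat) (s : List Int), s ∈ combs l k → s.length = k := by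
  intro l
  induction l with
  | nil => intro k s h; cases k <;> simp [combs] at h; simp [h]
  | cons x xs ih =>
    intro k s h
    cases k with
    | zero => simp [combs] at h; simp [h]
    | succ k =>
      simp only [combs, List.mem_append, List.mem_map] at h
      rcases h with ⟨t, ht, rfl⟩ | h
      · simp [ih k t ht]
      · exact ih (k + 1) s h

lemma mem_subsetsL_ne_nil {n : Int} {s : List Int} (h : s ∈ subsetsL n) : s ≠ [] := by
  simp only [subsetsL, List.mem_flatMap] at h
  rcases h with ⟨k, hk, hs⟩
  have h3 : 3 ≤ k := ((PySem.List.mem_pyRange_iff_of_pos (by norm_num) k).1 hk).1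
  have hl := length_of_mem_combs _ _ _ hs
  intro hnil
  rw [hnil] at hl
  simp at hl
  omega

lemma foldl_ite_add {α : Type} (p : α → Bool) (f : α → Int) :
    ∀ (l : List α) (a : Int),
      l.foldl (fun a x => if p x then a + f x else a) a
        = a + (l.map (fun x => if p x then f x else 0)).sum := by
  intro l
  induction l with
  | nil => simp
  | cons x xs ih =>
    intro a
    by_cases h : p x
    · simp [h, ih]; ring
    · simp [h, ih]

lemma outer_sum (cycles : List (List Int)) :
    ∀ (L : List Int) (a : Int), (∀ i ∈ L, 0 ≤ i) →
      L.foldl (fun a2 i =>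
          (PySem.List.pyRange (i + 1) ((cycles.length : Int)) 1).foldl (fun a2 j =>
            if disj (PySem.List.pyGetD cycles i []) (PySem.List.pyGetD cycles j []) then a2 + 1
            else a2) a2) a
        = a + (L.map (fun i => ((cycles.drop (i + 1).toNat).map
            (fun t => if disj (PySem.List.pyGetD cycles i []) t then (1 : Int) else 0)).sum)).sum := by
  intro L
  induction L with
  | nil => simp
  | cons i L ih =>
    intro a hL
    have hi : (0 : Int) ≤ i + 1 := by have := hL i (by simp); omega
    have hhead : (PySem.List.pyRange (i + 1) ((cycles.length : Int)) 1).foldl (fun a2 j =>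
        if disj (PySem.List.pyGetD cycles i []) (PySem.List.pyGetD cycles j []) then a2 + 1
        else a2) a
        = a + ((cycles.drop (i + 1).toNat).map
            (fun t => if disj (PySem.List.pyGetD cycles i []) t then (1 : Int) else 0)).sum := by
      rw [PySem.List.foldl_pyRange_pyGetD' cycles []
        (fun a2 t => if disj (PySem.List.pyGetD cycles i []) t then a2 + 1 else a2) a hi]
      simp only [foldl_ite_add]
    rw [List.foldl_cons, hhead, ih _ (fun j hj => hL j (by simp [hj]))]
    simp [add_assoc]

lemma idx_sum_eq_pairCnt :
    ∀ (cyc : List (List Int)),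
      ((List.range cyc.length).map (fun k => ((cyc.drop (k + 1)).map
          (fun t => if disj (cyc.getD k []) t then (1 : Int) else 0)).sum)).sum = pairCnt cyc := by
  intro cyc
  induction cyc with
  | nil => simp [pairCnt]
  | cons x xs ih =>
    rw [List.length_cons, List.range_succ_eq_map]
    simp only [List.map_cons, List.map_map, List.sum_cons]
    have : ((List.range xs.length).map (fun k =>
        (((x :: xs).drop (k + 1 + 1)).map
          (fun t => if disj ((x :: xs).getD (k + 1) []) t then (1 : Int) else 0)).sum)) =
        ((List.range xs.length).map (fun k => ((xs.drop (k + 1)).map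
          (fun t => if disj (xs.getD k []) t then (1 : Int) else 0)).sum)) := by
      apply List.map_congr_left; intro k _; rfl
    simp only [Function.comp_def, Nat.succ_eq_add_one, this, ih]
    simp [pairCnt]

lemma pairLoop_eq : ∀ (G : List (List Int × Int)) (a : Int), pairLoop a G = a + pairB G := by
  intro G
  induction G with
  | nil => intro a; simp [pairLoop, pairB]
  | cons p rest ih =>
    intro a
    obtain ⟨s, c⟩ := p
    rw [pairLoop]
    simp only [disjB_eq]
    simp only [foldl_ite_add]
    rw [ih, pairB]
    ring

lemma disj_self {s : List Int} (h : s ≠ []) : disj s s = false := by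
  cases s with
  | nil => exact absurd rfl h
  | cons x xs => simp [disj]

lemma pairCnt_append :
    ∀ (xs ys : List (List Int)),
      pairCnt (xs ++ ys) = pairCnt xs
        + (xs.map (fun x => (ys.map (fun y => if disj x y then (1 : Int) else 0)).sum)).sum
        + pairCnt ys := by
  intro xs ys
  induction xs with
  | nil => simp [pairCnt]
  | cons x xs ih =>
    simp only [List.cons_append, pairCnt, List.map_append, List.sum_append, List.map_cons,
      List.sum_cons, ih]
    ring

lemma pairCnt_replicate {s : List Int} (h : s ≠ []) : ∀ m, pairCnt (List.replicate m s) = 0 := by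
  intro m
  induction m with
  | zero => rfl
  | succ m ih =>
    rw [List.replicate_succ, pairCnt, ih]
    simp [disj_self h]

lemma cross_sum (s : List Int) :
    ∀ (rest : List (List Int × Int)), (∀ p ∈ rest, 0 < p.2) →
      ((rest.flatMap (fun p => List.replicate p.2.toNat p.1)).map
          (fun y => if disj s y then (1 : Int) else 0)).sum
        = (rest.map (fun p => if disj s p.1 then p.2 else 0)).sum := by
  intro rest
  induction rest with
  | nil => simp
  | cons p rest ih =>
    intro hpos
    obtain ⟨t, d⟩ := p
    have hd : 0 < d := hpos (t, d) (by simp)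
    simp only [List.flatMap_cons, List.map_append, List.sum_append, List.map_replicate,
      List.sum_replicate, List.map_cons, List.sum_cons]
    rw [ih (fun q hq => hpos q (by simp [hq]))]
    congr 1
    by_cases h : disj s t <;> simp [h, Int.toNat_of_nonneg (le_of_lt hd)]

lemma pairCnt_flatMap :
    ∀ (G : List (List Int × Int)), (∀ p ∈ G, 0 < p.2 ∧ p.1 ≠ []) →
      pairCnt (G.flatMap (fun p => List.replicate p.2.toNat p.1)) = pairB G := by
  intro G
  induction G with
  | nil => simp [pairB, pairCnt]
  | cons p rest ih =>
    intro hG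
    obtain ⟨s, c⟩ := p
    obtain ⟨hc, hs⟩ := hG (s, c) (by simp)
    rw [List.flatMap_cons, pairCnt_append, pairCnt_replicate hs,
      ih (fun q hq => hG q (by simp [hq]))]
    simp only [List.map_replicate, List.sum_replicate, nsmul_eq_mul]
    rw [cross_sum s rest (fun q hq => (hG q (by simp [hq])).1)]
    simp only [Int.toNat_of_nonneg (le_of_lt hc), pairB]
    rw [← List.sum_map_mul_left]
    have : (rest.map (fun p => c * if disj s p.1 then p.2 else 0))
        = (rest.map (fun p => if disj s p.1 then c * p.2 else 0)) := by
      apply List.map_congr_left; intro q _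
      by_cases h : disj s q.1 <;> simp [h]
    rw [this]
    ring

lemma a1_len :
    ∀ (G : List (List Int × Int)), (∀ p ∈ G, 0 < p.2) →
      (((G.flatMap (fun p => List.replicate p.2.toNat p.1)).length : Int)) = (G.map (·.2)).sum := by
  intro G
  induction G with
  | nil => simp
  | cons p rest ih =>
    intro hG
    obtain ⟨s, c⟩ := p
    have hc : 0 < c := hG (s, c) (by simp)
    simp only [List.flatMap_cons, List.length_append, List.length_replicate, List.map_cons,
      List.sum_cons]
    rw [← ih (fun q hq => hG q (by simp [hq]))]
    push_cast
    rw [Int.toNat_of_nonneg (le_of_lt hc)]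

lemma mem_grp {A : List (List Int)} {n : Int} {p : List Int × Int} (h : p ∈ grp A n) :
    0 < p.2 ∧ p.1 ≠ [] := by
  simp only [grp, List.mem_map, List.mem_filter, decide_eq_true_eq] at h
  rcases h with ⟨s, ⟨hsmem, hspos⟩, rfl⟩
  exact ⟨hspos, mem_subsetsL_ne_nil hsmem⟩

lemma flatMap_rep_grp (A : List (List Int)) :
    ∀ (L : List (List Int)),
      L.flatMap (fun s => List.replicate (countDHC A s).toNat s)
        = ((L.filter (fun s => decide (0 < countDHC A s))).map
            (fun s => (s, countDHC A s))).flatMap (fun p => List.replicate p.2.toNat p.1) := by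
  intro L
  induction L with
  | nil => rfl
  | cons s L ih =>
    by_cases h : 0 < countDHC A s
    · simp [List.flatMap_cons, h, ih]
    · have : (countDHC A s).toNat = 0 := by omega
      simp [List.flatMap_cons, h, this, ih]

lemma grp_flatMap (A : List (List Int)) (n : Int) :
    (subsetsL n).flatMap (fun s => List.replicate (countDHC A s).toNat s)
      = (grp A n).flatMap (fun p => List.replicate p.2.toNat p.1) := by
  rw [grp, flatMap_rep_grp]

lemma cyclesA_closed (A : List (List Int)) (n : Int) :
    ((PySem.List.pyRange 3 (n + 1) 2).foldl (fun cyc k =>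
        (combs (PySem.List.pyRange 0 n 1) k.toNat).foldl
          (fun cyc s => cyc ++ List.replicate (countDHC A s).toNat s) cyc) [])
      = (grp A n).flatMap (fun p => List.replicate p.2.toNat p.1) := by
  simp only [PySem.List.foldl_append_eq_flatMap]
  rw [← grp_flatMap, subsetsL, List.flatMap_assoc]
  simp

lemma groupsB_closed (A : List (List Int)) (n : Int) :
    ((PySem.List.pyRange 3 (n + 1) 2).foldl (fun g k =>
        (combs (PySem.List.pyRange 0 n 1) k.toNat).foldl
          (fun g s => if 0 < countDHC A s then g ++ [(s, countDHC A s)] else g) g) [])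
      = grp A n := by
  have hinner : ∀ (k : Int) (g : List (List Int × Int)),
      (combs (PySem.List.pyRange 0 n 1) k.toNat).foldl
          (fun g s => if 0 < countDHC A s then g ++ [(s, countDHC A s)] else g) g
        = g ++ ((combs (PySem.List.pyRange 0 n 1) k.toNat).filter
            (fun s => decide (0 < countDHC A s))).map (fun s => (s, countDHC A s)) := by
    intro k g
    simp only [PySem.List.foldl_append_ite]
  simp only [hinner]
  simp only [PySem.List.foldl_append_eq_flatMap]
  rw [grp, subsetsL, List.filter_flatMap, List.map_flatMap]
  simp

lemma a2_closed (cycles : List (List Int)) :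
    ((PySem.List.pyRange 0 (PySem.List.len cycles) 1).foldl (fun a2 i =>
        (PySem.List.pyRange (i + 1) (PySem.List.len cycles) 1).foldl (fun a2 j =>
          if disj (PySem.List.pyGetD cycles i []) (PySem.List.pyGetD cycles j []) then a2 + 1
          else a2) a2) 0)
      = pairCnt cycles := by
  simp only [PySem.List.len_eq]
  rw [outer_sum cycles _ 0 (fun i hi => (PySem.List.mem_pyRange_one.1 hi).1)]
  rw [← idx_sum_eq_pairCnt cycles]
  simp only [PySem.List.pyRange_zero_natCast, List.map_map, zero_add]
  congr 1
  apply List.map_congr_left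
  intro k _
  have h1 : ((k : Int) + 1).toNat = k + 1 := by omega
  simp only [Function.comp_def, PySem.List.pyGetD_natCast, h1]

-- ===== VERDICT (by name: the statement is the Claim_ definition above) =====
theorem get_cycle_data_spec : Claim_equal_get_cycle_data := by
  intro A n _ _
  unfold Spec_get_cycle_data
  simp only [get_cycle_data, get_cycle_data_alt, countB_eq, combsB_eq]
  rw [cyclesA_closed, groupsB_closed]
  refine Prod.ext ?_ (Prod.ext ?_ rfl)
  · simp only [PySem.List.len_eq]
    exact a1_len (grp A n) (fun p hp => (mem_grp hp).1)
  · rw [a2_closed, pairLoop_eq, pairCnt_flatMap (grp A n) (fun p hp => mem_grp hp)]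
    ring
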